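-- pv_equiv track=rewrite | github.com/zizhaof/deeppin | backend/services/attachment_processor.py | _chunk_fixed
-- ===== SOURCE A (Python) =====
-- CHUNK_SIZE    = 350   # Chunk size for fixed-size fallback
--
-- CHUNK_OVERLAP = 50    # Overlap for fixed-size fallback
--
-- def _chunk_fixed(text: str) -> list[str]:
--     """
--     Fixed-size sliding-window chunker (fallback for semantic chunking).
--     """
--     if len(text) <= CHUNK_SIZE:
--         return [text.strip()] if text.strip() else []
--     chunks: list[str] = []
--     start = 0
--     while start < len(text):
--         end = min(start + CHUNK_SIZE, len(text))
--         chunks.append(text[start:end].strip())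
--         if end == len(text):
--             break
--         start = end - CHUNK_OVERLAP
--         if start <= 0:
--             break
--     return [c for c in chunks if c]
-- ===== SOURCE B (Python) =====
-- CHUNK_SIZE    = 350   # Chunk size for fixed-size fallback
--
-- CHUNK_OVERLAP = 50    # Overlap for fixed-size fallback
--
-- def _chunk_fixed(text: str) -> list[str]:
--     """
--     Streaming chunker: a single character-by-character pass with a carried
--     buffer. The buffer is emitted (stripped) whenever it fills to CHUNK_SIZE,
--     keeping the last CHUNK_OVERLAP characters as the start of the next window;
--     a trailing partial buffer is emitted only if it holds characters consumed
--     after the last emission. No length arithmetic or slicing of `text` at all.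
--     """
--     chunks: list[str] = []
--     buf: list[str] = []
--     fresh = 0
--     for ch in text:
--         buf.append(ch)
--         fresh += 1
--         if len(buf) == CHUNK_SIZE:
--             chunks.append(''.join(buf).strip())
--             buf = buf[-CHUNK_OVERLAP:]
--             fresh = 0
--     if fresh:
--         chunks.append(''.join(buf).strip())
--     return [c for c in chunks if c]
-- ===== Notes on version B (the rewrite author's own statement) =====
-- stated objective: alternative
-- what changed: Replaces A's index/slice while-loop over text by a single character-by-character streaming pass with a carried buffer: the buffer is emitted when it fills to 350 chars, keeping its last 50 chars as the next window's start, and a trailing partial buffer is emitted only if it holds fresh characters; no positions, slices of text or length arithmetic are used.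
import Mathlib
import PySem

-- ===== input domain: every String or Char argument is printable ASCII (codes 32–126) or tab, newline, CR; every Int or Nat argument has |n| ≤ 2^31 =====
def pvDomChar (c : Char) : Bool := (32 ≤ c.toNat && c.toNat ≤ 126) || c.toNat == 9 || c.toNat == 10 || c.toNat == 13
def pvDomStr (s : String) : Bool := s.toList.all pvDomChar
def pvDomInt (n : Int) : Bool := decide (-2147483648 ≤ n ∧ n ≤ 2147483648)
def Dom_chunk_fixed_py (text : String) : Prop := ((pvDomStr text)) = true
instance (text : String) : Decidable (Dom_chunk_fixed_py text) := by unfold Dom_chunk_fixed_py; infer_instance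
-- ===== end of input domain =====

-- B replaces A's index/slice while-loop by a single char-by-char streaming pass with a
-- carried buffer (emit at 350 chars, keep the last 50); same output, no speed claim.

-- ===== PORT A =====
-- the while-loop of A; start is a Nat (Python's start = end - 50 stays >= 300 here,
-- so Python's 'if start <= 0: break' is transcribed as 'e - 50 = 0', equivalent on Nat).
-- fuel only guards totality (one unit per iteration; s.length units always suffice).
def chunkLoopA (s : List Char) : Nat → Nat → List (List Char) → List (List Char)
  | 0, _, acc => acc
  | fuel + 1, start, acc =>
    if start < s.length then
      let e := min (start + 350) s.length
      let acc' := acc ++ [PySem.Chars.strip (PySem.List.slice s (some (start : Int)) (some (e : Int)))]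
      if e = s.length then acc'
      else if e - 50 = 0 then acc'
      else chunkLoopA s fuel (e - 50) acc'
    else acc

def chunk_fixed_py (text : String) : List String :=
  let s := text.toList
  if s.length ≤ 350 then
    (if PySem.Chars.strip s ≠ [] then [String.ofList (PySem.Chars.strip s)] else [])
  else
    ((chunkLoopA s s.length 0 []).filter (· ≠ [])).map String.ofList

-- ===== PORT B =====
-- one streaming step of Source B's for-loop: append the char, count it as fresh,
-- emit the stripped buffer when it fills to 350 keeping its last 50 chars (buf[-50:]).
def chunkStepB (st : List (List Char) × List Char × Nat) (c : Char) :
    List (List Char) × List Char × Nat :=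
  let buf := st.2.1 ++ [c]
  let fresh := st.2.2 + 1
  if buf.length = 350 then
    (st.1 ++ [PySem.Chars.strip buf], PySem.List.slice buf (some (-50 : Int)) none, 0)
  else
    (st.1, buf, fresh)

def chunk_fixed_py_alt (text : String) : List String :=
  let st := text.toList.foldl chunkStepB ([], [], 0)
  let chunks := if st.2.2 ≠ 0 then st.1 ++ [PySem.Chars.strip st.2.1] else st.1
  (chunks.filter (· ≠ [])).map String.ofList

-- ===== PRECONDITION & SPEC =====
def Spec_chunk_fixed_py (text : String) (out : List String) : Prop := out = chunk_fixed_py_alt text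
instance (text : String) (out : List String) : Decidable (Spec_chunk_fixed_py text out) := by unfold Spec_chunk_fixed_py; infer_instance

-- ===== CLAIM (what is proved, stated in full; the proofs are below) =====
def Claim_equal_chunk_fixed_py : Prop := ∀ (text : String), Dom_chunk_fixed_py text → Spec_chunk_fixed_py text (chunk_fixed_py text)

-- ===== LEMMAS AND PROOFS =====

-- the chunk at window i; both programs' emitted chunks reduce to this
def chunkAt (s : List Char) (i : Nat) : List Char :=
  PySem.Chars.strip ((s.drop (300 * i)).take 350)

lemma sliceA_eq (s : List Char) (i : Nat) :
    PySem.Chars.strip (PySem.List.slice s (some ((300 * i : Nat) : Int)) (some ((300 * i + 350 : Nat) : Int)))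
      = chunkAt s i := by
  rw [PySem.List.slice_natCast]
  simp [chunkAt]

-- number of emissions after B has consumed t characters
def emitsB (t : Nat) : Nat := (t - 50) / 300

-- fresh-character count after B has consumed t characters
def freshB (t : Nat) : Nat := t - 300 * emitsB t - 50 * min (emitsB t) 1

-- invariant of B's streaming fold over the first t characters
lemma foldB_inv (s : List Char) : ∀ t, t ≤ s.length →
    (s.take t).foldl chunkStepB ([], [], 0) =
      ((List.range (emitsB t)).map (chunkAt s), (s.take t).drop (300 * emitsB t), freshB t) := by
  intro t
  induction t with
  | zero => intro _; simp [emitsB, freshB]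
  | succ t ih =>
    intro hle
    have ht : t < s.length := by omega
    have htake : s.take (t + 1) = s.take t ++ [s[t]] := by
      rw [List.take_add_one]
      simp [List.getElem?_eq_getElem ht]
    rw [htake, List.foldl_append, ih (by omega)]
    simp only [List.foldl_cons, List.foldl_nil, chunkStepB, emitsB, freshB]
    have hm : 300 * ((t - 50) / 300) ≤ t := by omega
    have hbuf : (s.take t).drop (300 * ((t - 50) / 300)) ++ [s[t]]
        = (s.take t ++ [s[t]]).drop (300 * ((t - 50) / 300)) :=
      (List.drop_append_of_le_length (by simp; omega)).symm
    have hlen : ((s.take t).drop (300 * ((t - 50) / 300)) ++ [s[t]]).length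
        = t + 1 - 300 * ((t - 50) / 300) := by simp; omega
    rw [hlen]
    by_cases hfull : t + 1 - 300 * ((t - 50) / 300) = 350
    · -- the buffer fills to 350: emit
      have hm1 : (t + 1 - 50) / 300 = (t - 50) / 300 + 1 := by omega
      rw [if_pos hfull, hm1]
      simp only [Prod.mk.injEq]
      refine ⟨?_, ?_, ?_⟩
      · rw [List.range_succ, List.map_append, List.map_singleton]
        congr 1
        rw [hbuf, ← htake]
        have h1 : (s.take (t + 1)).drop (300 * ((t - 50) / 300))
            = (s.drop (300 * ((t - 50) / 300))).take 350 := by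
          rw [List.drop_take]; congr 1
        rw [h1]
        simp [chunkAt]
      · rw [hbuf, ← htake, PySem.List.slice_from_neg_ofNat _ 50 (by omega)]
        have hl2 : ((s.take (t + 1)).drop (300 * ((t - 50) / 300))).length = 350 := by
          simp; omega
        rw [hl2, show (350 : Nat) - 50 = 300 from rfl, List.drop_drop]
        try congr 1
        try omega
      · omega
    · -- no emission yet
      have hm1 : (t + 1 - 50) / 300 = (t - 50) / 300 := by omega
      rw [if_neg hfull, hm1]
      simp only [Prod.mk.injEq]
      exact ⟨by trivial, hbuf, by omega⟩

-- A's loop produces the windows i, i+1, …, i+d (the last one reaching the end of s)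
lemma loopA_eq (s : List Char) (hk : 350 < s.length) :
    ∀ d i acc fuel, d < fuel → i + d = (s.length - 350 + 299) / 300 →
      chunkLoopA s fuel (300 * i) acc = acc ++ (List.range' i (d + 1)).map (chunkAt s) := by
  intro d
  induction d with
  | zero =>
    intro i acc fuel hf hi
    obtain ⟨f, rfl⟩ : ∃ f, fuel = f + 1 := ⟨fuel - 1, by omega⟩
    have hdm := Nat.div_add_mod (s.length - 350 + 299) 300
    have hml : (s.length - 350 + 299) % 300 < 300 := Nat.mod_lt _ (by omega)
    have hlt : 300 * i < s.length := by omega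
    have hmin : min (300 * i + 350) s.length = s.length := by omega
    simp only [chunkLoopA, if_pos hlt, hmin]
    have : PySem.Chars.strip (PySem.List.slice s (some ((300 * i : Nat) : Int)) (some ((s.length : Nat) : Int)))
        = chunkAt s i := by
      rw [PySem.List.slice_natCast]
      have h1 : (s.drop (300 * i)).take (s.length - 300 * i) = s.drop (300 * i) := by
        apply List.take_of_length_le; simp
      have h2 : (s.drop (300 * i)).take 350 = s.drop (300 * i) := by
        apply List.take_of_length_le; simp; omega
      simp [chunkAt, h1, h2]
    simp
    exact_mod_cast this
  | succ d ih =>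
    intro i acc fuel hf hi
    obtain ⟨f, rfl⟩ : ∃ f, fuel = f + 1 := ⟨fuel - 1, by omega⟩
    have hdm := Nat.div_add_mod (s.length - 350 + 299) 300
    have hml : (s.length - 350 + 299) % 300 < 300 := Nat.mod_lt _ (by omega)
    have hlt : 300 * i < s.length := by omega
    have hmin : min (300 * i + 350) s.length = 300 * i + 350 := by omega
    have hne : ¬ (300 * i + 350 = s.length) := by omega
    have hnz : ¬ (300 * i + 350 - 50 = 0) := by omega
    simp only [chunkLoopA, if_pos hlt, hmin, if_neg hne, if_neg hnz]
    have hstep : 300 * i + 350 - 50 = 300 * (i + 1) := by omega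
    rw [hstep, ih (i + 1) _ f (by omega) (by omega)]
    have hr : List.range' i (d + 1 + 1) = i :: List.range' (i + 1) (d + 1) := by
      rw [List.range'_succ]
    rw [hr]
    have := sliceA_eq s i
    simp
    exact_mod_cast this

-- B's whole result: the first M windows, M = emissions + (1 if a fresh tail remains)
lemma altB_eq (text : String) :
    chunk_fixed_py_alt text =
      (((List.range (emitsB text.toList.length + (if freshB text.toList.length ≠ 0 then 1 else 0))).map
          (chunkAt text.toList)).filter (· ≠ [])).map String.ofList := by
  unfold chunk_fixed_py_alt
  have h := foldB_inv text.toList text.toList.length (le_refl _)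
  rw [List.take_length] at h
  rw [h]
  dsimp only
  split_ifs with hf
  · congr 2
    rw [List.range_succ, List.map_append, List.map_singleton]
    refine congrArg
        (fun x => List.map (chunkAt text.toList) (List.range (emitsB text.toList.length)) ++ [x])
        (congrArg PySem.Chars.strip (List.take_of_length_le ?_).symm)
    simp only [List.length_drop]
    have hL : text.length = text.toList.length := by simp
    unfold emitsB
    omega
  · simp

-- ===== VERDICT (by name: the statement is the Claim_ definition above) =====
theorem chunk_fixed_py_spec : Claim_equal_chunk_fixed_py := by
  intro text _
  unfold Spec_chunk_fixed_py
  rw [altB_eq]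
  unfold chunk_fixed_py
  set s := text.toList with hs
  by_cases h : s.length ≤ 350
  · -- short input: B produces at most window 0, which is strip s
    simp only [h, if_pos]
    have hM : emitsB s.length + (if freshB s.length ≠ 0 then 1 else 0)
        = if s.length = 0 then 0 else 1 := by
      unfold freshB emitsB
      split_ifs <;> omega
    rw [hM]
    have hc0 : chunkAt s 0 = PySem.Chars.strip s := by
      simp [chunkAt, List.take_of_length_le (by omega : s.length ≤ 350)]
    by_cases hn : s.length = 0
    · have hnil : s = [] := List.eq_nil_of_length_eq_zero hn
      rw [if_pos hn, hnil]
      decide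
    · rw [if_neg hn]
      simp only [List.range_one, List.map_singleton, hc0]
      by_cases hstrip : PySem.Chars.strip s = []
      · simp [hstrip]
      · simp [hstrip]
  · -- long input: A's loop and B's stream both yield the first k+1 windows
    simp only [h, if_false]
    have hk : 350 < s.length := by omega
    have hmain := loopA_eq s hk ((s.length - 350 + 299) / 300) 0 [] s.length
      (by omega) (by omega)
    simp only [Nat.mul_zero] at hmain
    rw [hmain]
    have hM : emitsB s.length + (if freshB s.length ≠ 0 then 1 else 0)
        = (s.length - 350 + 299) / 300 + 1 := by
      unfold freshB emitsB
      split_ifs <;> omega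
    rw [hM, List.range_eq_range']
    simp
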